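-- pv_equiv track=rewrite | github.com/bostannnn/clu-comics | core/comicinfo.py | clean_markdown_list
-- ===== SOURCE A (Python) =====
-- def clean_markdown_list(md_text: str) -> str:
--     """
--     Removes blocks of text starting with '*List' and any following tables,
--     regardless of whether there's a blank line between them.
--
--     A table is considered part of '*List' if it directly follows '*List'
--     or if there's a blank line in between.
--
--     :param md_text: The original Markdown text (string).
--     :return:        The cleaned text with '*List' sections and associated tables removed.
--     """
--     lines = md_text.splitlines()
--     cleaned_lines = []
--     removing_list_block = False
--
--     for i, line in enumerate(lines):
--         stripped_line = line.lstrip()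
--
--         # Detect start of '*List' block
--         if stripped_line.startswith('*List'):
--             removing_list_block = True
--             continue  # Skip this line
--
--         # If removing, check for table structure (lines containing '|')
--         if removing_list_block:
--             # Remove tables (lines containing '|') or blank lines in between
--             if stripped_line == "" or '|' in stripped_line:
--                 continue
--             else:
--                 removing_list_block = False  # Stop removing if normal text appears
--
--         # Append the line if it's not part of the removed section
--         cleaned_lines.append(line)
--
--     return "\n".join(cleaned_lines).strip()
-- ===== SOURCE B (Python) =====
-- def clean_markdown_list(md_text: str) -> str:
--     lines = md_text.splitlines()
--     # Pass 1: split the lines into segments separated by '*List' header lines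
--     # (the headers themselves are discarded).
--     segments = []
--     cur = []
--     for line in lines:
--         if line.lstrip().startswith('*List'):
--             segments.append(cur)
--             cur = []
--         else:
--             cur.append(line)
--     segments.append(cur)
--     # Pass 2: the first segment is kept whole; every later segment loses its
--     # leading run of blank / pipe lines (the table attached to its header).
--     kept = segments[0]
--     for seg in segments[1:]:
--         j = 0
--         while j < len(seg) and (seg[j].lstrip() == '' or '|' in seg[j].lstrip()):
--             j += 1
--         kept = kept + seg[j:]
--     return "\n".join(kept).strip()
-- ===== Notes on version B (the rewrite author's own statement) =====
-- stated objective: alternative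
-- what changed: Replaced A's single stateful pass with a boolean removing-flag by two staged passes: first split the lines into segments at '*List' header lines, then keep the first segment whole and drop the leading blank/pipe run of each later segment before concatenating.
import Mathlib
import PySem

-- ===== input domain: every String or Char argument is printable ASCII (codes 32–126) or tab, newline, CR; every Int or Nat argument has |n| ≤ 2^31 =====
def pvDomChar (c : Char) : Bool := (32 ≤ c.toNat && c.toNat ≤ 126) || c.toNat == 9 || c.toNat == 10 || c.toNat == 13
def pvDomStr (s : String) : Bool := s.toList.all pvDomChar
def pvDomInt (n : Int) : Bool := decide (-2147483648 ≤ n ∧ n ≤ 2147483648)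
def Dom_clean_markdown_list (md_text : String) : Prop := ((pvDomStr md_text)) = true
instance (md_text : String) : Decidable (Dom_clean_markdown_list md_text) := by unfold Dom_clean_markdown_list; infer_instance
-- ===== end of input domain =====

-- B replaces A's single stateful flag-carrying pass by two staged passes: split the lines into
-- segments at '*List' header lines, then keep the first segment whole and drop each later
-- segment's leading blank/pipe run (alternative decomposition, same cost).

-- ===== PORT A =====
def stepA (st : List String × Bool) (line : String) : List String × Bool :=
  let stripped := PySem.Str.lstrip line
  if PySem.Str.startswith stripped "*List" then (st.1, true)
  else if st.2 then
    (if stripped == "" || PySem.Str.isIn "|" stripped then (st.1, true)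
     else (st.1 ++ [line], false))
  else (st.1 ++ [line], false)

def clean_markdown_list (md_text : String) : String :=
  let lines := PySem.Str.splitlines md_text
  let cleaned := (lines.foldl stepA ([], false)).1
  PySem.Str.strip (PySem.Str.join "\n" cleaned)

-- ===== PORT B =====
-- Pass 1 of Source B: split the line list into segments at '*List' header lines (headers discarded)
def splitSegs : List String → List String → List (List String)
  | [], cur => [cur]
  | l :: rest, cur =>
    if PySem.Str.startswith (PySem.Str.lstrip l) "*List" then cur :: splitSegs rest []
    else splitSegs rest (cur ++ [l])

-- inner while loop of pass 2 of Source B: drop the leading run of blank / pipe lines (= seg[j:])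
def dropBP : List String → List String
  | [] => []
  | l :: rest =>
    let t := PySem.Str.lstrip l
    if t == "" || PySem.Str.isIn "|" t then dropBP rest else l :: rest

-- pass 2 of Source B: kept = segments[0]; for seg in segments[1:]: kept = kept + seg[j:]
def foldSegs : List (List String) → List String
  | [] => []
  | s0 :: rest => List.foldl (fun acc seg => acc ++ dropBP seg) s0 rest

def clean_markdown_list_alt (md_text : String) : String :=
  let segs := splitSegs (PySem.Str.splitlines md_text) []
  PySem.Str.strip (PySem.Str.join "\n" (foldSegs segs))

-- ===== PRECONDITION & SPEC =====
def Spec_clean_markdown_list (md_text : String) (out : String) : Prop := out = clean_markdown_list_alt md_text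
instance (md_text : String) (out : String) : Decidable (Spec_clean_markdown_list md_text out) := by unfold Spec_clean_markdown_list; infer_instance

-- ===== CLAIM =====
def Claim_equal_clean_markdown_list : Prop := ∀ (md_text : String), Dom_clean_markdown_list md_text → Spec_clean_markdown_list md_text (clean_markdown_list md_text)

-- ===== LEMMAS AND PROOFS =====

theorem dropBP_length_le : ∀ (xs : List String), (dropBP xs).length ≤ xs.length := by
  intro xs
  induction xs with
  | nil => simp [dropBP]
  | cons l rest ih =>
    simp only [dropBP]
    split
    · exact Nat.le_trans ih (Nat.le_succ _)
    · simp

-- proof-side reference function: A's flag loop written as a recursion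
def cleanB : List String → List String
  | [] => []
  | l :: rest =>
    let s := PySem.Str.lstrip l
    if PySem.Str.startswith s "*List" then cleanB (dropBP rest)
    else l :: cleanB rest
termination_by xs => xs.length
decreasing_by
  · exact Nat.lt_succ_of_le (dropBP_length_le rest)
  · simp

-- with the removing-flag set, A's fold behaves like first consuming the blank/pipe block
theorem foldl_flag_true (lines : List String) : ∀ (acc : List String),
    (List.foldl stepA (acc, true) lines).1 = (List.foldl stepA (acc, false) (dropBP lines)).1 := by
  induction lines with
  | nil => intro acc; simp [dropBP]
  | cons l rest ih =>
    intro acc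
    by_cases hstart : PySem.Chars.startswith (PySem.Chars.lstrip l.toList) ['*', 'L', 'i', 's', 't'] = true
    · by_cases hbp : PySem.Str.lstrip l = "" ∨ PySem.Chars.isIn ['|'] (PySem.Chars.lstrip l.toList) = true
      · simpa [List.foldl, dropBP, stepA, hstart, hbp] using ih acc
      · simp [List.foldl, dropBP, stepA, hstart, hbp]
    · by_cases hbp : PySem.Str.lstrip l = "" ∨ PySem.Chars.isIn ['|'] (PySem.Chars.lstrip l.toList) = true
      · simpa [List.foldl, dropBP, stepA, hstart, hbp] using ih acc
      · simp [List.foldl, dropBP, stepA, hstart, hbp]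

theorem foldl_flag_false : ∀ (n : Nat) (lines : List String), lines.length ≤ n → ∀ (acc : List String),
    (List.foldl stepA (acc, false) lines).1 = acc ++ cleanB lines := by
  intro n
  induction n with
  | zero =>
    intro lines hlen acc
    have : lines = [] := List.eq_nil_of_length_eq_zero (Nat.le_zero.mp hlen)
    subst this; simp [cleanB]
  | succ m ih =>
    intro lines hlen acc
    cases lines with
    | nil => simp [cleanB]
    | cons l rest =>
      have hrest : rest.length ≤ m := by simpa using Nat.lt_succ_iff.mp (Nat.lt_of_lt_of_le (by simp) hlen)
      by_cases hstart : PySem.Chars.startswith (PySem.Chars.lstrip l.toList) ['*', 'L', 'i', 's', 't'] = true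
      · have h1 := foldl_flag_true rest acc
        have h2 := ih (dropBP rest) (Nat.le_trans (dropBP_length_le rest) hrest) acc
        simp only [List.foldl] at h1 h2 ⊢
        simp [stepA, cleanB, hstart, h1, h2]
      · have h2 := ih rest hrest (acc ++ [l])
        simp only [List.foldl] at h2 ⊢
        simp [stepA, cleanB, hstart, h2]

theorem dropBP_append (xs ys : List String) :
    dropBP (xs ++ ys) = if dropBP xs = [] then dropBP ys else dropBP xs ++ ys := by
  induction xs with
  | nil => simp [dropBP]
  | cons x t ih =>
    by_cases h : PySem.Str.lstrip x = "" ∨ PySem.Chars.isIn ['|'] (PySem.Chars.lstrip x.toList) = true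
    · simp [dropBP, h, ih]
    · simp [dropBP, h]

theorem mem_dropBP : ∀ (xs : List String) (l : String), l ∈ dropBP xs → l ∈ xs := by
  intro xs
  induction xs with
  | nil => simp [dropBP]
  | cons x t ih =>
    intro l hl
    simp only [dropBP] at hl
    split at hl
    · exact List.mem_cons_of_mem _ (ih l hl)
    · exact hl

theorem cleanB_append_noHdr (xs : List String)
    (hx : ∀ l ∈ xs, PySem.Chars.startswith (PySem.Chars.lstrip l.toList) ['*', 'L', 'i', 's', 't'] = false)
    (ys : List String) : cleanB (xs ++ ys) = xs ++ cleanB ys := by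
  induction xs with
  | nil => simp
  | cons x t ih =>
    have hx0 := hx x (by simp)
    have ht := ih (fun l hl => hx l (List.mem_cons_of_mem _ hl))
    simp [cleanB, hx0, ht]

theorem cleanB_noHdr (xs : List String)
    (hx : ∀ l ∈ xs, PySem.Chars.startswith (PySem.Chars.lstrip l.toList) ['*', 'L', 'i', 's', 't'] = false) :
    cleanB xs = xs := by
  simpa [cleanB] using cleanB_append_noHdr xs hx []

-- the tail segments, each stripped of its leading blank/pipe run, equal A's flag loop after consumption
theorem segs_tail_eq (lines : List String) : ∀ (cur : List String),
    (∀ l ∈ cur, PySem.Chars.startswith (PySem.Chars.lstrip l.toList) ['*', 'L', 'i', 's', 't'] = false) →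
    ((splitSegs lines cur).map dropBP).flatten = cleanB (dropBP (cur ++ lines)) := by
  induction lines with
  | nil =>
    intro cur hcur
    have h := cleanB_noHdr (dropBP cur) (fun l hl => hcur l (mem_dropBP cur l hl))
    simp [splitSegs, h]
  | cons l rest ih =>
    intro cur hcur
    by_cases hh : PySem.Chars.startswith (PySem.Chars.lstrip l.toList) ['*', 'L', 'i', 's', 't'] = true
    · have ih0 := ih [] (by simp)
      simp only [List.nil_append] at ih0
      have hgoal : ((splitSegs (l :: rest) cur).map dropBP).flatten
          = dropBP cur ++ cleanB (dropBP rest) := by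
        simp [splitSegs, hh, ih0]
      rw [hgoal, dropBP_append]
      by_cases hnil : dropBP cur = []
      · simp only [hnil, List.nil_append]
        by_cases hbp : PySem.Str.lstrip l = "" ∨ PySem.Chars.isIn ['|'] (PySem.Chars.lstrip l.toList) = true
        · simp [dropBP, hbp]
        · simp [dropBP, hbp, cleanB, hh]
      · rw [if_neg hnil, cleanB_append_noHdr _ (fun x hx => hcur x (mem_dropBP cur x hx))]
        simp [cleanB, hh]
    · have hcur' : ∀ x ∈ cur ++ [l],
          PySem.Chars.startswith (PySem.Chars.lstrip x.toList) ['*', 'L', 'i', 's', 't'] = false := by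
        intro x hx
        rcases List.mem_append.mp hx with h | h
        · exact hcur x h
        · simp only [List.mem_singleton] at h; subst h; simpa using hh
      have ht := ih (cur ++ [l]) hcur'
      simpa [splitSegs, hh, List.append_assoc] using ht

theorem foldSegs_cons (S : List (List String)) : ∀ (s0 : List String),
    foldSegs (s0 :: S) = s0 ++ (S.map dropBP).flatten := by
  induction S with
  | nil => intro s0; simp [foldSegs]
  | cons a t ih =>
    intro s0
    have := ih (s0 ++ dropBP a)
    simp only [foldSegs, List.foldl] at this ⊢
    simp [this, List.append_assoc]

-- B's two staged passes compute exactly A's flag loop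
theorem segs_eq (lines : List String) : ∀ (cur : List String),
    (∀ l ∈ cur, PySem.Chars.startswith (PySem.Chars.lstrip l.toList) ['*', 'L', 'i', 's', 't'] = false) →
    foldSegs (splitSegs lines cur) = cur ++ cleanB lines := by
  induction lines with
  | nil => intro cur _; simp [splitSegs, foldSegs, cleanB]
  | cons l rest ih =>
    intro cur hcur
    by_cases hh : PySem.Chars.startswith (PySem.Chars.lstrip l.toList) ['*', 'L', 'i', 's', 't'] = true
    · have ht := segs_tail_eq rest [] (by simp)
      simp only [List.nil_append] at ht
      simp [splitSegs, hh, foldSegs_cons, ht, cleanB]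
    · have hcur' : ∀ x ∈ cur ++ [l],
          PySem.Chars.startswith (PySem.Chars.lstrip x.toList) ['*', 'L', 'i', 's', 't'] = false := by
        intro x hx
        rcases List.mem_append.mp hx with h | h
        · exact hcur x h
        · simp only [List.mem_singleton] at h; subst h; simpa using hh
      have := ih (cur ++ [l]) hcur'
      simpa [splitSegs, hh, cleanB, List.append_assoc] using this

-- ===== VERDICT =====
theorem clean_markdown_list_spec : Claim_equal_clean_markdown_list := by
  intro md_text _
  show clean_markdown_list md_text = clean_markdown_list_alt md_text
  simp only [clean_markdown_list, clean_markdown_list_alt]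
  rw [foldl_flag_false (PySem.Str.splitlines md_text).length _ (Nat.le_refl _) [],
    segs_eq (PySem.Str.splitlines md_text) [] (by simp)]
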